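-- pv_equiv track=rewrite | github.com/Ilyes-Origamist/IEEEXtreme-ENP | Solved problems/largest-matrix-zone-flood-fill-stack.py | initiate_flood_fill
-- ===== SOURCE A (Python) =====
-- from typing import List, Tuple
--
-- def initiate_flood_fill(array2d: List[List[int]], ir: int, ic: int, row: int, col: int, prev_color: int, color: int) -> int:
--     stack = [(ir, ic)]
--     size = 0
--     is_valid_zone = True
--
--     while stack:
--         cr, cc = stack.pop()
--
--         # Skip if out of bounds or not matching the color we're flooding
--         if cr < 0 or cr >= row or cc < 0 or cc >= col or array2d[cr][cc] != prev_color: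
--             continue
--
--         # If touching the border, invalidate this zone
--         if cr == 0 or cr == row - 1 or cc == 0 or cc == col - 1:
--             is_valid_zone = False
--
--         # Color the current cell and increment size
--         array2d[cr][cc] = color
--         size += 1
--
--         # Push neighbors to the stack
--         stack.append((cr-1, cc))  # Up
--         stack.append((cr+1, cc))  # Down
--         stack.append((cr, cc-1))  # Left
--         stack.append((cr, cc+1))  # Right
--
--     return size if is_valid_zone else 0
-- ===== SOURCE B (Python) =====
-- def initiate_flood_fill(array2d, ir, ic, row, col, prev_color, color):
--     is_valid_zone = True
--
--     def helper(r, c):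
--         nonlocal is_valid_zone
--         if r < 0 or r >= row or c < 0 or c >= col or array2d[r][c] != prev_color:
--             return 0
--         if r == 0 or r == row - 1 or c == 0 or c == col - 1:
--             is_valid_zone = False
--         array2d[r][c] = color
--         return 1 + helper(r, c + 1) + helper(r, c - 1) + helper(r + 1, c) + helper(r - 1, c)
--
--     size = helper(ir, ic)
--     return size if is_valid_zone else 0
-- ===== Notes on version B (the rewrite author's own statement) =====
-- stated objective: alternative
-- what changed: The explicit stack worklist with in-loop state is replaced by a recursive DFS helper that returns the subtree's cell count and threads the border-validity flag; the outer function is a single call plus the final validity test (same recoloring mutation of array2d, same return value).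
-- outside the precondition, e.g. on initiate_flood_fill([[7]], 0, 0, 1, 1, 7, 7): A returns 0, B returns 0; on initiate_flood_fill([[1, 2], [3]], 0, 0, 2, 2, 1, 9): A returns 0, B returns 0
import Mathlib
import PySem

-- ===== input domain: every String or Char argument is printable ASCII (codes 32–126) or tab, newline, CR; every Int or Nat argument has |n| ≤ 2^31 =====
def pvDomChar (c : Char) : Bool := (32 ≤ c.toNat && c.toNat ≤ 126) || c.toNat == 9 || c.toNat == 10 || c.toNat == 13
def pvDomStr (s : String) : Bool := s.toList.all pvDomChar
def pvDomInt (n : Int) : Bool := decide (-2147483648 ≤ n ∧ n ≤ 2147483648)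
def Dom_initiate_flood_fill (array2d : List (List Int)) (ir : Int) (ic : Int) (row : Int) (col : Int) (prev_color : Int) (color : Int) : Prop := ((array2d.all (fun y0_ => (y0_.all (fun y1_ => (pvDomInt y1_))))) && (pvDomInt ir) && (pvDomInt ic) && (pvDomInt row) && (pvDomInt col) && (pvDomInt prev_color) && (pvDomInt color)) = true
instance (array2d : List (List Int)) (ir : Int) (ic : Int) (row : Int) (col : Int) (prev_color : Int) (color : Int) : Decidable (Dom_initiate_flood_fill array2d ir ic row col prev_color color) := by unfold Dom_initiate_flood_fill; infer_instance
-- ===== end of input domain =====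

-- B replaces A's explicit stack worklist by a recursive DFS helper threading the validity flag; both mutate
-- array2d identically (same cells recolored) and the theorems below are about the RETURN VALUE only.

-- ===== PORT A =====
-- array2d[cr][cc] (read); only reached after the 0 <= cr < row, 0 <= cc < col guard, as in Python
def pvCellFF (g : List (List Int)) (r c : Int) : Option Int :=
  (PySem.List.pyGet? g r).bind (fun ro => PySem.List.pyGet? ro c)

-- array2d[cr][cc] = color; only reached in-range and with nonnegative indices, where pySetD/pyGetD are exact
def pvSetFF (g : List (List Int)) (r c v : Int) : List (List Int) :=
  PySem.List.pySetD g r (PySem.List.pySetD (PySem.List.pyGetD g r []) c v)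

-- number of cells equal to prev: fuel bound for the ports' loops (Python's loop/recursion is unbounded;
-- inside Pre_ this fuel is sufficient, which the equivalence proof below establishes)
def pvCountFF (g : List (List Int)) (p : Int) : Nat :=
  (g.map (fun ro => ro.count p)).sum

-- A's while-loop over the explicit stack (top of stack = head of list; Python pushes up,down,left,right,
-- so pop order is right,left,down,up)
def floodLoopA (row col prev color : Int) : Nat → List (List Int) → List (Int × Int) → Int → Bool → Int
  | _, _, [], size, valid => if valid then size else 0
  | 0, _, _ :: _, size, valid => if valid then size else 0   -- fuel exhausted: Python diverges here (outside Pre_)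
  | fuel+1, g, (cr, cc) :: rest, size, valid =>
    if cr < 0 ∨ row ≤ cr ∨ cc < 0 ∨ col ≤ cc then
      floodLoopA row col prev color fuel g rest size valid
    else
      match pvCellFF g cr cc with
      | none => floodLoopA row col prev color fuel g rest size valid   -- Python raises IndexError here (outside Pre_)
      | some v =>
        if v ≠ prev then
          floodLoopA row col prev color fuel g rest size valid
        else
          floodLoopA row col prev color fuel (pvSetFF g cr cc color)
            ((cr, cc+1) :: (cr, cc-1) :: (cr+1, cc) :: (cr-1, cc) :: rest) (size + 1)
            (if cr = 0 ∨ cr = row - 1 ∨ cc = 0 ∨ cc = col - 1 then false else valid)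

def initiate_flood_fill (array2d : List (List Int)) (ir : Int) (ic : Int) (row : Int) (col : Int) (prev_color : Int) (color : Int) : Int :=
  floodLoopA row col prev_color color (4 * pvCountFF array2d prev_color + 1) array2d [(ir, ic)] 0 true

-- ===== PORT B =====
-- B's recursive helper: returns (mutated grid, cells recolored in this subtree, validity flag)
def fillB (row col prev color : Int) : Nat → List (List Int) → Int → Int → Bool → (List (List Int) × Int × Bool)
  | 0, g, _, _, valid => (g, 0, valid)   -- fuel exhausted: Python recursion diverges here (outside Pre_)
  | fuel+1, g, r, c, valid =>
    if r < 0 ∨ row ≤ r ∨ c < 0 ∨ col ≤ c then (g, 0, valid)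
    else
      match pvCellFF g r c with
      | none => (g, 0, valid)   -- Python raises IndexError here (outside Pre_)
      | some v =>
        if v ≠ prev then (g, 0, valid)
        else
          let valid1 := if r = 0 ∨ r = row - 1 ∨ c = 0 ∨ c = col - 1 then false else valid
          let s1 := fillB row col prev color fuel (pvSetFF g r c color) r (c+1) valid1
          let s2 := fillB row col prev color fuel s1.1 r (c-1) s1.2.2
          let s3 := fillB row col prev color fuel s2.1 (r+1) c s2.2.2
          let s4 := fillB row col prev color fuel s3.1 (r-1) c s3.2.2
          (s4.1, 1 + s1.2.1 + s2.2.1 + s3.2.1 + s4.2.1, s4.2.2)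

def initiate_flood_fill_alt (array2d : List (List Int)) (ir : Int) (ic : Int) (row : Int) (col : Int) (prev_color : Int) (color : Int) : Int :=
  let s := fillB row col prev_color color (pvCountFF array2d prev_color + 1) array2d ir ic true
  if s.2.2 then s.2.1 else 0

-- ===== PRECONDITION & SPEC =====
-- Pre_ excludes inputs where Python A raises IndexError (the fill reads a cell beyond the actual list sizes)
-- or loops forever (color == prev_color with a matching start cell); the static bound it uses also excludes
-- some ragged or equal-color inputs on which A happens to return 0 — see the cited examples in the claim.
def Pre_initiate_flood_fill (array2d : List (List Int)) (ir : Int) (ic : Int) (row : Int) (col : Int) (prev_color : Int) (color : Int) : Prop :=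
  (0 ≤ ir ∧ ir < row ∧ 0 ≤ ic ∧ ic < col) →
    (pvCellFF array2d ir ic ≠ none ∧
     (pvCellFF array2d ir ic = some prev_color →
        (color ≠ prev_color ∧ row ≤ (array2d.length : Int) ∧
         ∀ ro ∈ array2d.take row.toNat, col ≤ (ro.length : Int))))
instance (array2d : List (List Int)) (ir : Int) (ic : Int) (row : Int) (col : Int) (prev_color : Int) (color : Int) : Decidable (Pre_initiate_flood_fill array2d ir ic row col prev_color color) := by unfold Pre_initiate_flood_fill; infer_instance

def pvWitness_initiate_flood_fill : List (List Int) × Int × Int × Int × Int × Int × Int :=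
  ([[0, 0, 0], [0, 5, 0], [0, 0, 0]], 1, 1, 3, 3, 5, 7)

def Spec_initiate_flood_fill (array2d : List (List Int)) (ir : Int) (ic : Int) (row : Int) (col : Int) (prev_color : Int) (color : Int) (out : Int) : Prop := out = initiate_flood_fill_alt array2d ir ic row col prev_color color
instance (array2d : List (List Int)) (ir : Int) (ic : Int) (row : Int) (col : Int) (prev_color : Int) (color : Int) (out : Int) : Decidable (Spec_initiate_flood_fill array2d ir ic row col prev_color color out) := by unfold Spec_initiate_flood_fill; infer_instance

-- ===== CLAIM (what is proved, stated in full; the proofs are below) =====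
def Claim_equal_initiate_flood_fill : Prop := ∀ (array2d : List (List Int)) (ir : Int) (ic : Int) (row : Int) (col : Int) (prev_color : Int) (color : Int), Dom_initiate_flood_fill array2d ir ic row col prev_color color → Pre_initiate_flood_fill array2d ir ic row col prev_color color → Spec_initiate_flood_fill array2d ir ic row col prev_color color (initiate_flood_fill array2d ir ic row col prev_color color)

-- ===== LEMMAS AND PROOFS =====

-- sequential processing of a list of seeds by fillB: what floodLoopA is shown to compute
def runFillB (row col prev color : Int) (fB : Nat) : List (List Int) → List (Int × Int) → Int → Bool → Int
  | _, [], size, valid => if valid then size else 0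
  | g, (r, c) :: rest, size, valid =>
    let s := fillB row col prev color fB g r c valid
    runFillB row col prev color fB s.1 rest (size + s.2.1) s.2.2

theorem count_set_cell (prev color : Int) (hne : color ≠ prev) :
    ∀ (l : List Int) (n : Nat), l[n]? = some prev → (l.set n color).count prev + 1 = l.count prev := by
  intro l n h
  have hn : n < l.length := by
    by_contra hge
    simp [List.getElem?_eq_none (by omega : l.length ≤ n)] at h
  have hget : l[n] = prev := by
    have := List.getElem?_eq_getElem hn
    rw [this] at h; exact Option.some.inj h
  have hpos : 0 < l.count prev := List.count_pos_iff.mpr (hget ▸ l.getElem_mem hn)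
  rw [List.count_set hn]
  simp [hget, hne]
  omega

theorem pvCount_set_row (p : Int) :
    ∀ (g : List (List Int)) (n : Nat) (ro newro : List Int), g[n]? = some ro →
      pvCountFF (g.set n newro) p + ro.count p = pvCountFF g p + newro.count p := by
  intro g
  induction g with
  | nil => intro n ro newro h; simp at h
  | cons hd tl ih =>
    intro n ro newro h
    cases n with
    | zero =>
      simp at h
      subst h
      simp [pvCountFF]
      omega
    | succ m =>
      simp at h
      have := ih m ro newro h
      simp [pvCountFF, List.set] at this ⊢
      omega

theorem pvCount_pvSet (g : List (List Int)) (r c prev color : Int) (hr : 0 ≤ r) (hc : 0 ≤ c)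
    (hcell : pvCellFF g r c = some prev) (hne : color ≠ prev) :
    pvCountFF (pvSetFF g r c color) prev + 1 = pvCountFF g prev := by
  cases hro : PySem.List.pyGet? g r with
  | none => simp [pvCellFF, hro] at hcell
  | some ro =>
    have hcc : PySem.List.pyGet? ro c = some prev := by simpa [pvCellFF, hro] using hcell
    have hg : g[r.toNat]? = some ro := by rw [← PySem.List.pyGet?_of_nonneg g hr]; exact hro
    have hrc : ro[c.toNat]? = some prev := by rw [← PySem.List.pyGet?_of_nonneg ro hc]; exact hcc
    have hset : pvSetFF g r c color = g.set r.toNat (ro.set c.toNat color) := by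
      have e1 := PySem.List.pyGetD_of_nonneg g ([] : List Int) hr
      rw [pvSetFF, e1, PySem.List.pySetD_of_nonneg _ _ hr,
        PySem.List.pySetD_of_nonneg _ _ hc, List.getD_eq_getElem?_getD, hg]
      rfl
    rw [hset]
    have h1 := pvCount_set_row prev g r.toNat ro (ro.set c.toNat color) hg
    have h2 := count_set_cell prev color hne ro c.toNat hrc
    omega

-- branch equations for fillB
theorem fillB_oob (row col prev color : Int) (f : Nat) (g : List (List Int)) (r c : Int) (valid : Bool)
    (h : r < 0 ∨ row ≤ r ∨ c < 0 ∨ col ≤ c) :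
    fillB row col prev color (f+1) g r c valid = (g, 0, valid) := by
  rw [fillB]; simp [h]

theorem fillB_none (row col prev color : Int) (f : Nat) (g : List (List Int)) (r c : Int) (valid : Bool)
    (h : ¬(r < 0 ∨ row ≤ r ∨ c < 0 ∨ col ≤ c)) (hc : pvCellFF g r c = none) :
    fillB row col prev color (f+1) g r c valid = (g, 0, valid) := by
  rw [fillB]; simp [h, hc]

theorem fillB_mismatch (row col prev color : Int) (f : Nat) (g : List (List Int)) (r c : Int) (valid : Bool)
    (v : Int) (h : ¬(r < 0 ∨ row ≤ r ∨ c < 0 ∨ c ≥ col)) (hc : pvCellFF g r c = some v) (hv : v ≠ prev) :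
    fillB row col prev color (f+1) g r c valid = (g, 0, valid) := by
  rw [fillB]; simp [h, hc, hv]

theorem fillB_fill (row col prev color : Int) (f : Nat) (g : List (List Int)) (r c : Int) (valid : Bool)
    (h : ¬(r < 0 ∨ row ≤ r ∨ c < 0 ∨ col ≤ c)) (hc : pvCellFF g r c = some prev) :
    fillB row col prev color (f+1) g r c valid =
      (let v1 := if r = 0 ∨ r = row - 1 ∨ c = 0 ∨ c = col - 1 then false else valid
       let s1 := fillB row col prev color f (pvSetFF g r c color) r (c+1) v1
       let s2 := fillB row col prev color f s1.1 r (c-1) s1.2.2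
       let s3 := fillB row col prev color f s2.1 (r+1) c s2.2.2
       let s4 := fillB row col prev color f s3.1 (r-1) c s3.2.2
       (s4.1, 1 + s1.2.1 + s2.2.1 + s3.2.1 + s4.2.1, s4.2.2)) := by
  rw [fillB]; simp [h, hc]

theorem fillB_count_le (row col prev color : Int) (hne : color ≠ prev) :
    ∀ (fuel : Nat) (g : List (List Int)) (r c : Int) (valid : Bool),
      pvCountFF (fillB row col prev color fuel g r c valid).1 prev ≤ pvCountFF g prev := by
  intro fuel
  induction fuel with
  | zero => intro g r c valid; simp [fillB]
  | succ f ih =>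
    intro g r c valid
    by_cases hg : r < 0 ∨ row ≤ r ∨ c < 0 ∨ col ≤ c
    · rw [fillB_oob row col prev color f g r c valid hg]
    · cases hcell : pvCellFF g r c with
      | none => rw [fillB_none row col prev color f g r c valid hg hcell]
      | some v =>
        by_cases hv : v = prev
        · subst hv
          rw [fillB_fill row col v color f g r c valid hg hcell]
          have hr : (0:Int) ≤ r := by by_contra h; exact hg (Or.inl (by omega))
          have hc0 : (0:Int) ≤ c := by by_contra h; exact hg (Or.inr (Or.inr (Or.inl (by omega))))
          have hdec := pvCount_pvSet g r c v color hr hc0 hcell hne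
          set g1 := pvSetFF g r c color with hg1
          simp only []
          set s1 := fillB row col v color f g1 r (c+1) (if r = 0 ∨ r = row - 1 ∨ c = 0 ∨ c = col - 1 then false else valid) with hs1
          set s2 := fillB row col v color f s1.1 r (c-1) s1.2.2 with hs2
          set s3 := fillB row col v color f s2.1 (r+1) c s2.2.2 with hs3
          set s4 := fillB row col v color f s3.1 (r-1) c s3.2.2 with hs4
          have t1 : pvCountFF s1.1 v ≤ pvCountFF g1 v := hs1 ▸ ih g1 r (c+1) _
          have t2 : pvCountFF s2.1 v ≤ pvCountFF s1.1 v := hs2 ▸ ih s1.1 r (c-1) _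
          have t3 : pvCountFF s3.1 v ≤ pvCountFF s2.1 v := hs3 ▸ ih s2.1 (r+1) c _
          have t4 : pvCountFF s4.1 v ≤ pvCountFF s3.1 v := hs4 ▸ ih s3.1 (r-1) c _
          omega
        · rw [fillB_mismatch row col prev color f g r c valid v hg hcell hv]

theorem fillB_fuel_irrel (row col prev color : Int) (hne : color ≠ prev) :
    ∀ (n : Nat) (g : List (List Int)), pvCountFF g prev ≤ n →
      ∀ (f f' : Nat), pvCountFF g prev < f → pvCountFF g prev < f' →
      ∀ (r c : Int) (valid : Bool),
        fillB row col prev color f g r c valid = fillB row col prev color f' g r c valid := by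
  intro n
  induction n with
  | zero =>
    intro g hgn f f' hf hf' r c valid
    obtain ⟨f, rfl⟩ : ∃ k, f = k + 1 := ⟨f - 1, by omega⟩
    obtain ⟨f', rfl⟩ : ∃ k, f' = k + 1 := ⟨f' - 1, by omega⟩
    by_cases hg : r < 0 ∨ row ≤ r ∨ c < 0 ∨ col ≤ c
    · rw [fillB_oob row col prev color f g r c valid hg,
          fillB_oob row col prev color f' g r c valid hg]
    · cases hcell : pvCellFF g r c with
      | none =>
        rw [fillB_none row col prev color f g r c valid hg hcell,
            fillB_none row col prev color f' g r c valid hg hcell]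
      | some v =>
        by_cases hv : v = prev
        · exfalso
          subst hv
          have hr : (0:Int) ≤ r := by by_contra h; exact hg (Or.inl (by omega))
          have hc0 : (0:Int) ≤ c := by by_contra h; exact hg (Or.inr (Or.inr (Or.inl (by omega))))
          have hdec := pvCount_pvSet g r c v color hr hc0 hcell hne
          omega
        · rw [fillB_mismatch row col prev color f g r c valid v hg hcell hv,
              fillB_mismatch row col prev color f' g r c valid v hg hcell hv]
  | succ n ih =>
    intro g hgn f f' hf hf' r c valid
    obtain ⟨f, rfl⟩ : ∃ k, f = k + 1 := ⟨f - 1, by omega⟩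
    obtain ⟨f', rfl⟩ : ∃ k, f' = k + 1 := ⟨f' - 1, by omega⟩
    by_cases hg : r < 0 ∨ row ≤ r ∨ c < 0 ∨ col ≤ c
    · rw [fillB_oob row col prev color f g r c valid hg,
          fillB_oob row col prev color f' g r c valid hg]
    · cases hcell : pvCellFF g r c with
      | none =>
        rw [fillB_none row col prev color f g r c valid hg hcell,
            fillB_none row col prev color f' g r c valid hg hcell]
      | some v =>
        by_cases hv : v = prev
        · subst hv
          rw [fillB_fill row col v color f g r c valid hg hcell,
              fillB_fill row col v color f' g r c valid hg hcell]
          have hr : (0:Int) ≤ r := by by_contra h; exact hg (Or.inl (by omega))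
          have hc0 : (0:Int) ≤ c := by by_contra h; exact hg (Or.inr (Or.inr (Or.inl (by omega))))
          have hdec := pvCount_pvSet g r c v color hr hc0 hcell hne
          set g1 := pvSetFF g r c color with hg1
          set vv1 := (if r = 0 ∨ r = row - 1 ∨ c = 0 ∨ c = col - 1 then false else valid) with hvv1
          simp only []
          have hg1n : pvCountFF g1 v ≤ n := by omega
          have e1 : fillB row col v color f g1 r (c+1) vv1 = fillB row col v color f' g1 r (c+1) vv1 := by
            apply ih g1 hg1n f f' (by omega) (by omega)
          rw [e1]
          set s1 := fillB row col v color f' g1 r (c+1) vv1 with hs1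
          have c1 : pvCountFF s1.1 v ≤ pvCountFF g1 v := hs1 ▸ fillB_count_le row col v color hne f' g1 r (c+1) vv1
          have e2 : fillB row col v color f s1.1 r (c-1) s1.2.2 = fillB row col v color f' s1.1 r (c-1) s1.2.2 := by
            apply ih s1.1 (by omega) f f' (by omega) (by omega)
          rw [e2]
          set s2 := fillB row col v color f' s1.1 r (c-1) s1.2.2 with hs2
          have c2 : pvCountFF s2.1 v ≤ pvCountFF s1.1 v := hs2 ▸ fillB_count_le row col v color hne f' s1.1 r (c-1) s1.2.2
          have e3 : fillB row col v color f s2.1 (r+1) c s2.2.2 = fillB row col v color f' s2.1 (r+1) c s2.2.2 := by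
            apply ih s2.1 (by omega) f f' (by omega) (by omega)
          rw [e3]
          set s3 := fillB row col v color f' s2.1 (r+1) c s2.2.2 with hs3
          have c3 : pvCountFF s3.1 v ≤ pvCountFF s2.1 v := hs3 ▸ fillB_count_le row col v color hne f' s2.1 (r+1) c s2.2.2
          have e4 : fillB row col v color f s3.1 (r-1) c s3.2.2 = fillB row col v color f' s3.1 (r-1) c s3.2.2 := by
            apply ih s3.1 (by omega) f f' (by omega) (by omega)
          rw [e4]
        · rw [fillB_mismatch row col prev color f g r c valid v hg hcell hv,
              fillB_mismatch row col prev color f' g r c valid v hg hcell hv]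

theorem loopA_nil (row col prev color : Int) (fA : Nat) (g : List (List Int)) (size : Int) (valid : Bool) :
    floodLoopA row col prev color fA g [] size valid = if valid then size else 0 := by
  cases fA <;> rw [floodLoopA]

theorem loopA_oob (row col prev color : Int) (f : Nat) (g : List (List Int)) (r c : Int)
    (rest : List (Int × Int)) (size : Int) (valid : Bool)
    (h : r < 0 ∨ row ≤ r ∨ c < 0 ∨ col ≤ c) :
    floodLoopA row col prev color (f+1) g ((r, c) :: rest) size valid =
      floodLoopA row col prev color f g rest size valid := by
  rw [floodLoopA]; simp [h]

theorem loopA_none (row col prev color : Int) (f : Nat) (g : List (List Int)) (r c : Int)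
    (rest : List (Int × Int)) (size : Int) (valid : Bool)
    (h : ¬(r < 0 ∨ row ≤ r ∨ c < 0 ∨ col ≤ c)) (hc : pvCellFF g r c = none) :
    floodLoopA row col prev color (f+1) g ((r, c) :: rest) size valid =
      floodLoopA row col prev color f g rest size valid := by
  rw [floodLoopA]; simp [h, hc]

theorem loopA_mismatch (row col prev color : Int) (f : Nat) (g : List (List Int)) (r c : Int)
    (rest : List (Int × Int)) (size : Int) (valid : Bool) (v : Int)
    (h : ¬(r < 0 ∨ row ≤ r ∨ c < 0 ∨ col ≤ c)) (hc : pvCellFF g r c = some v) (hv : v ≠ prev) :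
    floodLoopA row col prev color (f+1) g ((r, c) :: rest) size valid =
      floodLoopA row col prev color f g rest size valid := by
  rw [floodLoopA]; simp [h, hc, hv]

theorem loopA_fill (row col prev color : Int) (f : Nat) (g : List (List Int)) (r c : Int)
    (rest : List (Int × Int)) (size : Int) (valid : Bool)
    (h : ¬(r < 0 ∨ row ≤ r ∨ c < 0 ∨ col ≤ c)) (hc : pvCellFF g r c = some prev) :
    floodLoopA row col prev color (f+1) g ((r, c) :: rest) size valid =
      floodLoopA row col prev color f (pvSetFF g r c color)
        ((r, c+1) :: (r, c-1) :: (r+1, c) :: (r-1, c) :: rest) (size + 1)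
        (if r = 0 ∨ r = row - 1 ∨ c = 0 ∨ c = col - 1 then false else valid) := by
  rw [floodLoopA]; simp [h, hc]

theorem loopA_eq_runFillB (row col prev color : Int) (hne : color ≠ prev) :
    ∀ (fA : Nat) (g : List (List Int)) (stack : List (Int × Int)) (size : Int) (valid : Bool) (fB : Nat),
      stack.length + 4 * pvCountFF g prev ≤ fA → pvCountFF g prev < fB →
      floodLoopA row col prev color fA g stack size valid = runFillB row col prev color fB g stack size valid := by
  intro fA
  induction fA with
  | zero =>
    intro g stack size valid fB hlen hfB
    cases stack with
    | nil => rw [loopA_nil, runFillB]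
    | cons p rest => simp at hlen
  | succ f ih =>
    intro g stack size valid fB hlen hfB
    cases stack with
    | nil => rw [loopA_nil, runFillB]
    | cons p rest =>
      obtain ⟨r, c⟩ := p
      obtain ⟨k, rfl⟩ : ∃ k, fB = k + 1 := ⟨fB - 1, by omega⟩
      simp only [List.length_cons] at hlen
      by_cases hg : r < 0 ∨ row ≤ r ∨ c < 0 ∨ col ≤ c
      · rw [loopA_oob row col prev color f g r c rest size valid hg, runFillB,
          fillB_oob row col prev color k g r c valid hg]
        simp only [add_zero]
        exact ih g rest size valid (k+1) (by omega) hfB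
      · cases hcell : pvCellFF g r c with
        | none =>
          rw [loopA_none row col prev color f g r c rest size valid hg hcell, runFillB,
            fillB_none row col prev color k g r c valid hg hcell]
          simp only [add_zero]
          exact ih g rest size valid (k+1) (by omega) hfB
        | some v =>
          by_cases hv : v = prev
          · subst hv
            have hr : (0:Int) ≤ r := by by_contra hx; exact hg (Or.inl (by omega))
            have hc0 : (0:Int) ≤ c := by by_contra hx; exact hg (Or.inr (Or.inr (Or.inl (by omega))))
            have hdec := pvCount_pvSet g r c v color hr hc0 hcell hne
            rw [loopA_fill row col v color f g r c rest size valid hg hcell]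
            set g1 := pvSetFF g r c color with hg1
            set vv1 := (if r = 0 ∨ r = row - 1 ∨ c = 0 ∨ c = col - 1 then false else valid) with hvv1
            have hstep := ih g1 ((r, c+1) :: (r, c-1) :: (r+1, c) :: (r-1, c) :: rest) (size + 1) vv1 (k+1)
              (by simp only [List.length_cons]; omega) (by omega)
            rw [hstep]
            -- unfold the four seed steps on the left
            rw [runFillB]
            set s1 := fillB row col v color (k+1) g1 r (c+1) vv1 with hs1
            have c1 : pvCountFF s1.1 v ≤ pvCountFF g1 v := hs1 ▸ fillB_count_le row col v color hne (k+1) g1 r (c+1) vv1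
            rw [runFillB]
            set s2 := fillB row col v color (k+1) s1.1 r (c-1) s1.2.2 with hs2
            have c2 : pvCountFF s2.1 v ≤ pvCountFF s1.1 v := hs2 ▸ fillB_count_le row col v color hne (k+1) s1.1 r (c-1) s1.2.2
            rw [runFillB]
            set s3 := fillB row col v color (k+1) s2.1 (r+1) c s2.2.2 with hs3
            have c3 : pvCountFF s3.1 v ≤ pvCountFF s2.1 v := hs3 ▸ fillB_count_le row col v color hne (k+1) s2.1 (r+1) c s2.2.2
            rw [runFillB]
            set s4 := fillB row col v color (k+1) s3.1 (r-1) c s3.2.2 with hs4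
            -- now the right-hand side
            rw [runFillB, fillB_fill row col v color k g r c valid hg hcell]
            rw [← hg1, ← hvv1]
            simp only []
            have e1 : fillB row col v color k g1 r (c+1) vv1 = s1 := by
              rw [hs1]
              exact fillB_fuel_irrel row col v color hne (pvCountFF g1 v) g1 le_rfl k (k+1) (by omega) (by omega) r (c+1) vv1
            rw [e1]
            have e2 : fillB row col v color k s1.1 r (c-1) s1.2.2 = s2 := by
              rw [hs2]
              exact fillB_fuel_irrel row col v color hne (pvCountFF s1.1 v) s1.1 le_rfl k (k+1) (by omega) (by omega) r (c-1) s1.2.2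
            rw [e2]
            have e3 : fillB row col v color k s2.1 (r+1) c s2.2.2 = s3 := by
              rw [hs3]
              exact fillB_fuel_irrel row col v color hne (pvCountFF s2.1 v) s2.1 le_rfl k (k+1) (by omega) (by omega) (r+1) c s2.2.2
            rw [e3]
            have e4 : fillB row col v color k s3.1 (r-1) c s3.2.2 = s4 := by
              rw [hs4]
              exact fillB_fuel_irrel row col v color hne (pvCountFF s3.1 v) s3.1 le_rfl k (k+1) (by omega) (by omega) (r-1) c s3.2.2
            rw [e4]
            have harith : size + 1 + s1.2.1 + s2.2.1 + s3.2.1 + s4.2.1 = size + (1 + s1.2.1 + s2.2.1 + s3.2.1 + s4.2.1) := by ring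
            rw [harith]
          · rw [loopA_mismatch row col prev color f g r c rest size valid v hg hcell hv, runFillB,
              fillB_mismatch row col prev color k g r c valid v hg hcell hv]
            simp only [add_zero]
            exact ih g rest size valid (k+1) (by omega) hfB

-- ===== VERDICT (by name: the statement is the Claim_ definition above) =====
theorem initiate_flood_fill_spec : Claim_equal_initiate_flood_fill := by
  intro array2d ir ic row col prev color hdom hpre
  unfold Spec_initiate_flood_fill initiate_flood_fill initiate_flood_fill_alt
  by_cases hne : color = prev
  · -- color = prev_color: Pre_ forbids a matching in-range start, so both sides return 0 at once
    subst hne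
    by_cases hact : 0 ≤ ir ∧ ir < row ∧ 0 ≤ ic ∧ ic < col
    · have hg : ¬(ir < 0 ∨ row ≤ ir ∨ ic < 0 ∨ col ≤ ic) := by omega
      obtain ⟨hnn, himp⟩ := hpre hact
      cases hcell : pvCellFF array2d ir ic with
      | none => exact absurd hcell hnn
      | some v =>
        by_cases hv : v = color
        · exact absurd rfl (himp (hv ▸ hcell)).1
        · rw [loopA_mismatch row col color color _ array2d ir ic [] 0 true v hg hcell hv,
            loopA_nil, fillB_mismatch row col color color _ array2d ir ic true v hg hcell hv]
    · have hg : ir < 0 ∨ row ≤ ir ∨ ic < 0 ∨ col ≤ ic := by omega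
      rw [loopA_oob row col color color _ array2d ir ic [] 0 true hg, loopA_nil,
        fillB_oob row col color color _ array2d ir ic true hg]
  · have hmain := loopA_eq_runFillB row col prev color hne
      (4 * pvCountFF array2d prev + 1) array2d [(ir, ic)] 0 true (pvCountFF array2d prev + 1)
      (by simp only [List.length_cons, List.length_nil]; omega) (by omega)
    rw [hmain, runFillB, runFillB]
    simp only [zero_add]
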